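-- pv_equiv track=rewrite | github.com/emmaeng700/leetcodemr | generate_print_6up.py | _split_brace_items
-- ===== SOURCE A (Python) =====
-- def _find_close_brace(s, start):
--     depth, i, n = 0, start, len(s)
--     while i < n:
--         c = s[i]
--         if c == "{": depth += 1; i += 1
--         elif c == "}":
--             depth -= 1
--             if depth == 0: return i
--             i += 1
--         elif c == "'":
--             i += 1
--             while i < n:
--                 if s[i] == "\\": i += 2; continue
--                 if s[i] == "'": i += 1; break
--                 i += 1
--         elif c == '"':
--             i += 1
--             while i < n:
--                 if s[i] == "\\": i += 2; continue
--                 if s[i] == '"': i += 1; break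
--                 i += 1
--         else: i += 1
--     return -1
--
-- def _split_brace_items(s):
--     items, i, n = [], 0, len(s)
--     while i < n:
--         while i < n and s[i] in " \t\n\r,": i += 1
--         if i >= n or s[i] == "]": break
--         if s[i] == "{":
--             end = _find_close_brace(s, i)
--             if end == -1: break
--             items.append(s[i:end+1]); i = end + 1
--         else: i += 1
--     return items
-- ===== SOURCE B (Python) =====
-- def _split_brace_items(s):
--     items = []
--     buf = []
--     depth = 0
--     quote = ""
--     escaped = False
--     for c in s:
--         if depth == 0:
--             if c == "]":
--                 break
--             if c == "{":
--                 buf = [c]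
--                 depth = 1
--         elif quote:
--             buf.append(c)
--             if escaped:
--                 escaped = False
--             elif c == "\\":
--                 escaped = True
--             elif c == quote:
--                 quote = ""
--         else:
--             buf.append(c)
--             if c == "{":
--                 depth += 1
--             elif c == "}":
--                 depth -= 1
--                 if depth == 0:
--                     items.append("".join(buf))
--             elif c in "'\"":
--                 quote = c
--     return items
-- ===== Notes on version B (the rewrite author's own statement) =====
-- stated objective: alternative
-- what changed: Replaced A's two-function index-jumping design (an outer loop that slices out each item via a separate matching-brace scanner restarted at every '{') with a single character-consuming state machine that never uses indices or slicing: it folds over the characters once, accumulating the current item in a buffer and carrying depth, the open quote and an escape flag as explicit state.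
import Mathlib
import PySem

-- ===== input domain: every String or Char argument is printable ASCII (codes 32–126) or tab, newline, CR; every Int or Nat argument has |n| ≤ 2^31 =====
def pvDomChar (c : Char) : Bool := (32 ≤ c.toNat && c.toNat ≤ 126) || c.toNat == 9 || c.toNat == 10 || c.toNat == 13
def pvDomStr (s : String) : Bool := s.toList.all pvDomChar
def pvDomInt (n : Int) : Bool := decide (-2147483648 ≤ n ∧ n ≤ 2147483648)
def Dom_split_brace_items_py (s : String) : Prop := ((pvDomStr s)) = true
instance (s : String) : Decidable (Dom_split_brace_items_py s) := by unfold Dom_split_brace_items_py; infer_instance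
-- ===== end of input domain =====

-- B replaces A's index-jumping two-function design (outer loop + a matching-brace scanner that
-- slices out each item) by a character-consuming state machine that accumulates the current item
-- in a buffer, with the quote/escape context as explicit state (objective: alternative).
-- A's while-loops are ported with a structural fuel counter; each iteration strictly advances the
-- index, so the fuel passed at the entry points is always sufficient and the guard never fires.
-- B's for-loop is structural recursion over the character list (no fuel needed).

-- ===== PORT A =====

-- inner string-literal scan of _find_close_brace (the two identical inner `while` loops,
-- parametrised by the quote character q); returns the index after the closing quote
def strScanA (cs : List Char) (q : Char) : Nat → Nat → Nat
  | 0, i => i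
  | fuel + 1, i =>
    if i < cs.length then
      if cs.getD i ' ' = '\\' then strScanA cs q fuel (i + 2)
      else if cs.getD i ' ' = q then i + 1
      else strScanA cs q fuel (i + 1)
    else i

-- while-loop of _find_close_brace
def fcLoop (cs : List Char) : Nat → Int → Nat → Int
  | 0, _, _ => -1
  | fuel + 1, depth, i =>
    if i < cs.length then
      if cs.getD i ' ' = '{' then fcLoop cs fuel (depth + 1) (i + 1)
      else if cs.getD i ' ' = '}' then
        if depth - 1 = 0 then (i : Int) else fcLoop cs fuel (depth - 1) (i + 1)
      else if cs.getD i ' ' = '\'' then fcLoop cs fuel depth (strScanA cs '\'' cs.length (i + 1))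
      else if cs.getD i ' ' = '"' then fcLoop cs fuel depth (strScanA cs '"' cs.length (i + 1))
      else fcLoop cs fuel depth (i + 1)
    else -1

-- _find_close_brace(s, start)
def findCloseBrace (cs : List Char) (start : Nat) : Int := fcLoop cs (cs.length + 1) 0 start

-- `s[i] in " \t\n\r,"`
def wsChar (c : Char) : Bool := c = ' ' || c = '\t' || c = '\n' || c = '\r' || c = ','

-- inner `while i < n and s[i] in " \t\n\r,": i += 1`
def skipWs (cs : List Char) : Nat → Nat → Nat
  | 0, i => i
  | fuel + 1, i =>
    if i < cs.length then
      if wsChar (cs.getD i ' ') then skipWs cs fuel (i + 1) else i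
    else i

-- outer while-loop of _split_brace_items (`skipWs cs cs.length i` = the index after the
-- whitespace/comma skip, `findCloseBrace cs _` = python's `end`; both written inline)
def splitLoop (cs : List Char) : Nat → List String → Nat → List String
  | 0, items, _ => items
  | fuel + 1, items, i =>
    if i < cs.length then
      if cs.length ≤ skipWs cs cs.length i ∨ cs.getD (skipWs cs cs.length i) ' ' = ']' then items
      else if cs.getD (skipWs cs cs.length i) ' ' = '{' then
        if findCloseBrace cs (skipWs cs cs.length i) = -1 then items
        else splitLoop cs fuel
          (items ++ [String.ofList ((cs.drop (skipWs cs cs.length i)).take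
            ((findCloseBrace cs (skipWs cs cs.length i)).toNat + 1 - skipWs cs cs.length i))])
          ((findCloseBrace cs (skipWs cs cs.length i)).toNat + 1)
      else splitLoop cs fuel items (skipWs cs cs.length i + 1)
    else items

def split_brace_items_py (s : String) : List String :=
  splitLoop s.toList (s.toList.length + 1) [] 0

-- ===== PORT B =====

-- B's single `for c in s` loop: structural recursion over the remaining characters (the `break`
-- on a top-level ']' returns the accumulated items). State: items, the character buffer of the
-- current item (python's `buf`), depth, `quote` (python's quote string, '' ↦ none), escaped.
def bRun (cs : List Char) (items : List String) (buf : List Char) (depth : Int)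
    (quote : Option Char) (escaped : Bool) : List String :=
  match cs with
  | [] => items
  | c :: rest =>
    if depth = 0 then
      if c = ']' then items
      else if c = '{' then bRun rest items [c] 1 quote escaped
      else bRun rest items buf 0 quote escaped
    else match quote with
      | some q =>
        if escaped then bRun rest items (buf ++ [c]) depth (some q) false
        else if c = '\\' then bRun rest items (buf ++ [c]) depth (some q) true
        else if c = q then bRun rest items (buf ++ [c]) depth none false
        else bRun rest items (buf ++ [c]) depth (some q) false
      | none =>
        if c = '{' then bRun rest items (buf ++ [c]) (depth + 1) none false
        else if c = '}' then
          if depth - 1 = 0 then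
            bRun rest (items ++ [String.ofList (buf ++ [c])]) (buf ++ [c]) 0 none false
          else bRun rest items (buf ++ [c]) (depth - 1) none false
        else if c = '\'' ∨ c = '"' then bRun rest items (buf ++ [c]) depth (some c) false
        else bRun rest items (buf ++ [c]) depth none false

def split_brace_items_py_alt (s : String) : List String :=
  bRun s.toList [] [] 0 none false

-- ===== PRECONDITION & SPEC =====
def Spec_split_brace_items_py (s : String) (out : List String) : Prop := out = split_brace_items_py_alt s
instance (s : String) (out : List String) : Decidable (Spec_split_brace_items_py s out) := by unfold Spec_split_brace_items_py; infer_instance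

-- ===== CLAIM (what is proved, stated in full; the proofs are below) =====
def Claim_equal_split_brace_items_py : Prop := ∀ (s : String), Dom_split_brace_items_py s → Spec_split_brace_items_py s (split_brace_items_py s)

-- ===== LEMMAS AND PROOFS =====

theorem strScanA_ge (cs : List Char) (q : Char) :
    ∀ fuel i, i ≤ strScanA cs q fuel i := by
  intro fuel
  induction fuel with
  | zero => intro i; simp [strScanA]
  | succ fuel ih =>
    intro i
    rw [strScanA]
    split_ifs <;> first | omega | (have := ih (i + 2); omega) | (have := ih (i + 1); omega)

theorem strScanA_out (cs : List Char) (q : Char) (fuel i : Nat)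
    (h : ¬ i < cs.length) : strScanA cs q fuel i = i := by
  cases fuel with
  | zero => rfl
  | succ f => rw [strScanA, if_neg h]

theorem skipWs_stay (cs : List Char) (fuel i : Nat)
    (hw : ¬ wsChar (cs.getD i ' ') = true) : skipWs cs fuel i = i := by
  cases fuel with
  | zero => rfl
  | succ f =>
    rw [skipWs]
    split_ifs <;> rfl

theorem skipWs_out (cs : List Char) (fuel j : Nat)
    (h : ¬ j < cs.length) : skipWs cs fuel j = j := by
  cases fuel with
  | zero => rfl
  | succ f => rw [skipWs, if_neg h]

theorem skipWs_fuel (cs : List Char) :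
    ∀ f1 f2 i, cs.length - i ≤ f1 → cs.length - i ≤ f2 →
      skipWs cs f1 i = skipWs cs f2 i := by
  intro f1
  induction f1 with
  | zero =>
    intro f2 i h1 h2
    have hn : ¬ i < cs.length := by omega
    rw [skipWs_out cs 0 i hn, skipWs_out cs f2 i hn]
  | succ f1 ih =>
    intro f2 i h1 h2
    by_cases hn : i < cs.length
    · obtain ⟨f2', rfl⟩ : ∃ f2', f2 = f2' + 1 := by
        cases f2 with
        | zero => omega
        | succ f2' => exact ⟨f2', rfl⟩
      rw [skipWs, skipWs]
      split_ifs with hw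
      · exact ih f2' (i + 1) (by omega) (by omega)
      · rfl
    · rw [skipWs_out cs _ i hn, skipWs_out cs f2 i hn]

-- stepping over one whitespace/comma character inside skipWs
theorem skipWs_step (cs : List Char) (f i : Nat) (h : i < cs.length)
    (hw : wsChar (cs.getD i ' ') = true) (hf : cs.length - i ≤ f) :
    skipWs cs f i = skipWs cs f (i + 1) := by
  obtain ⟨f', rfl⟩ : ∃ f', f = f' + 1 := by
    cases f with
    | zero => omega
    | succ f' => exact ⟨f', rfl⟩
  conv_lhs => rw [skipWs]
  rw [if_pos h, if_pos hw]
  exact skipWs_fuel cs f' (f' + 1) (i + 1) (by omega) (by omega)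

theorem skipWs_ge (cs : List Char) : ∀ fuel i, i ≤ skipWs cs fuel i := by
  intro fuel
  induction fuel with
  | zero => intro i; simp [skipWs]
  | succ fuel ih =>
    intro i
    rw [skipWs]
    split_ifs <;> first | omega | (have := ih (i + 1); omega)

-- _find_close_brace never returns an index below its start (unless it reports -1)
theorem fcLoop_neg_or_ge (cs : List Char) :
    ∀ fuel (depth : Int) i, fcLoop cs fuel depth i = -1 ∨ (i : Int) ≤ fcLoop cs fuel depth i := by
  intro fuel
  induction fuel with
  | zero => intro depth i; left; rfl
  | succ fuel ih =>
    intro depth i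
    rw [fcLoop]
    split_ifs with h1 h2 h3 h4 h5 h6
    · rcases ih (depth + 1) (i + 1) with h' | h' <;> [left; right] <;> first | exact h' | omega
    · right; omega
    · rcases ih (depth - 1) (i + 1) with h' | h' <;> [left; right] <;> first | exact h' | omega
    · rcases ih depth (strScanA cs '\'' cs.length (i + 1)) with h' | h' <;> [left; right]
      · exact h'
      · have := strScanA_ge cs '\'' cs.length (i + 1); omega
    · rcases ih depth (strScanA cs '"' cs.length (i + 1)) with h' | h' <;> [left; right]
      · exact h'
      · have := strScanA_ge cs '"' cs.length (i + 1); omega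
    · rcases ih depth (i + 1) with h' | h' <;> [left; right] <;> first | exact h' | omega
    · left; rfl

theorem splitLoop_fuel (cs : List Char) :
    ∀ f1 f2 items i, cs.length - i ≤ f1 → cs.length - i ≤ f2 →
      splitLoop cs f1 items i = splitLoop cs f2 items i := by
  intro f1
  induction f1 with
  | zero =>
    intro f2 items i h1 h2
    have hn : ¬ i < cs.length := by omega
    cases f2 with
    | zero => rfl
    | succ f2' => simp only [splitLoop]; rw [if_neg hn]
  | succ f1 ih =>
    intro f2 items i h1 h2
    by_cases hn : i < cs.length
    · obtain ⟨f2', rfl⟩ : ∃ f2', f2 = f2' + 1 := by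
        cases f2 with
        | zero => omega
        | succ f2' => exact ⟨f2', rfl⟩
      have hjge := skipWs_ge cs cs.length i
      simp only [splitLoop]
      rw [if_pos hn, if_pos hn]
      split_ifs with hc1 hc2 hc3
      · rfl
      · rfl
      · rcases fcLoop_neg_or_ge cs (cs.length + 1) 0 (skipWs cs cs.length i) with h' | h'
        · exact absurd h' (by simpa [findCloseBrace] using hc3)
        · simp only [findCloseBrace] at h' ⊢
          exact ih f2' _ _ (by omega) (by omega)
      · exact ih f2' _ (skipWs cs cs.length i + 1) (by omega) (by omega)
    · cases f2 with
      | zero => simp only [splitLoop]; rw [if_neg hn]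
      | succ f2' => simp only [splitLoop]; rw [if_neg hn, if_neg hn]

-- the suffix at position i, as a cons
theorem drop_cons_getD (cs : List Char) (i : Nat) (h : i < cs.length) :
    cs.drop i = cs.getD i ' ' :: cs.drop (i + 1) := by
  rw [List.getD_eq_getElem cs ' ' h]
  exact (List.getElem_cons_drop h).symm

-- s[i:m] with its first character split off
theorem seg_cons (cs : List Char) (i m : Nat) (h : i < cs.length) (him : i + 1 ≤ m) :
    (cs.drop i).take (m - i) = cs.getD i ' ' :: (cs.drop (i + 1)).take (m - (i + 1)) := by
  rw [drop_cons_getD cs i h]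
  have : m - i = (m - (i + 1)) + 1 := by omega
  rw [this, List.take_succ_cons]

-- appending the character at i to the buffer extends the buffered segment by one
theorem buf_ext (cs : List Char) (i m : Nat) (buf : List Char)
    (h : i < cs.length) (him : i + 1 ≤ m) :
    (buf ++ [cs.getD i ' ']) ++ (cs.drop (i + 1)).take (m - (i + 1)) =
      buf ++ (cs.drop i).take (m - i) := by
  rw [List.append_assoc, List.singleton_append, seg_cons cs i m h him]

-- segment composition: s[i:k] ++ s[k:m] = s[i:m]
theorem seg_comp (cs : List Char) (i k m : Nat) (h1 : i ≤ k) (h2 : k ≤ m) :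
    (cs.drop i).take (k - i) ++ (cs.drop k).take (m - k) = (cs.drop i).take (m - i) := by
  have hm : m - i = (k - i) + (m - k) := by omega
  rw [hm, List.take_add, List.drop_drop]
  have hk : i + (k - i) = k := by omega
  rw [hk]

-- single-step unfoldings of B's machine
theorem bRun_esc (rest : List Char) (items : List String) (buf : List Char) (depth : Int)
    (q c : Char) (hd : ¬ depth = 0) :
    bRun (c :: rest) items buf depth (some q) true
      = bRun rest items (buf ++ [c]) depth (some q) false := by
  rw [bRun]; simp [hd]

theorem bRun_bs (rest : List Char) (items : List String) (buf : List Char) (depth : Int)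
    (q c : Char) (hd : ¬ depth = 0) (hc : c = '\\') :
    bRun (c :: rest) items buf depth (some q) false
      = bRun rest items (buf ++ [c]) depth (some q) true := by
  rw [bRun]; simp [hd, hc]

theorem bRun_closeq (rest : List Char) (items : List String) (buf : List Char) (depth : Int)
    (q c : Char) (hd : ¬ depth = 0) (hb : ¬ c = '\\') (hc : c = q) :
    bRun (c :: rest) items buf depth (some q) false
      = bRun rest items (buf ++ [c]) depth none false := by
  subst hc; rw [bRun]; simp [hd, hb]

theorem bRun_inq (rest : List Char) (items : List String) (buf : List Char) (depth : Int)
    (q c : Char) (hd : ¬ depth = 0) (hb : ¬ c = '\\') (hc : ¬ c = q) :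
    bRun (c :: rest) items buf depth (some q) false
      = bRun rest items (buf ++ [c]) depth (some q) false := by
  rw [bRun]; simp [hd, hb, hc]

theorem bRun_open (rest : List Char) (items : List String) (buf : List Char) (depth : Int)
    (c : Char) (hd : ¬ depth = 0) (hc : c = '{') :
    bRun (c :: rest) items buf depth none false
      = bRun rest items (buf ++ [c]) (depth + 1) none false := by
  rw [bRun]; simp [hd, hc]

theorem bRun_close0 (rest : List Char) (items : List String) (buf : List Char) (depth : Int)
    (c : Char) (hd : ¬ depth = 0) (hc : c = '}') (h1 : depth - 1 = 0) :
    bRun (c :: rest) items buf depth none false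
      = bRun rest (items ++ [String.ofList (buf ++ [c])]) (buf ++ [c]) 0 none false := by
  rw [bRun]; simp [hd, hc, h1]

theorem bRun_closeN (rest : List Char) (items : List String) (buf : List Char) (depth : Int)
    (c : Char) (hd : ¬ depth = 0) (hc : c = '}') (h1 : ¬ depth - 1 = 0) :
    bRun (c :: rest) items buf depth none false
      = bRun rest items (buf ++ [c]) (depth - 1) none false := by
  rw [bRun]; simp [hd, hc, h1]

theorem bRun_startq (rest : List Char) (items : List String) (buf : List Char) (depth : Int)
    (c : Char) (hd : ¬ depth = 0) (h1 : ¬ c = '{') (h2 : ¬ c = '}')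
    (hq : c = '\'' ∨ c = '"') :
    bRun (c :: rest) items buf depth none false
      = bRun rest items (buf ++ [c]) depth (some c) false := by
  rw [bRun]; simp [hd, h1, h2, hq]

theorem bRun_other (rest : List Char) (items : List String) (buf : List Char) (depth : Int)
    (c : Char) (hd : ¬ depth = 0) (h1 : ¬ c = '{') (h2 : ¬ c = '}')
    (hq : ¬ (c = '\'' ∨ c = '"')) :
    bRun (c :: rest) items buf depth none false
      = bRun rest items (buf ++ [c]) depth none false := by
  rw [bRun]; simp [hd, h1, h2, hq]

theorem bRun_top_brk (rest : List Char) (items : List String) (buf : List Char)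
    (quote : Option Char) (escaped : Bool) (c : Char) (hc : c = ']') :
    bRun (c :: rest) items buf 0 quote escaped = items := by
  rw [bRun.eq_def]; simp [hc]

theorem bRun_top_open (rest : List Char) (items : List String) (buf : List Char)
    (quote : Option Char) (escaped : Bool) (c : Char) (hc : c = '{') :
    bRun (c :: rest) items buf 0 quote escaped = bRun rest items [c] 1 quote escaped := by
  rw [bRun.eq_def]; simp [hc]

theorem bRun_top_skip (rest : List Char) (items : List String) (buf : List Char)
    (quote : Option Char) (escaped : Bool) (c : Char) (h1 : ¬ c = ']') (hc : ¬ c = '{') :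
    bRun (c :: rest) items buf 0 quote escaped = bRun rest items buf 0 quote escaped := by
  rw [bRun.eq_def]; simp [h1, hc]

-- B's machine in quote mode mirrors A's string-literal scan
theorem bRun_scan (cs : List Char) (q : Char) (depth : Int) (hd : ¬ depth = 0) :
    ∀ fuel j items buf, cs.length - j ≤ fuel →
      bRun (cs.drop j) items buf depth (some q) false =
        bRun (cs.drop (strScanA cs q fuel j)) items
          (buf ++ (cs.drop j).take (strScanA cs q fuel j - j)) depth none false := by
  intro fuel
  induction fuel with
  | zero =>
    intro j items buf hf
    have hn : ¬ j < cs.length := by omega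
    rw [strScanA_out cs q 0 j hn, List.drop_eq_nil_of_le (by omega)]
    rfl
  | succ fuel ih =>
    intro j items buf hf
    by_cases hn : j < cs.length
    · by_cases hb : cs.getD j ' ' = '\\'
      · -- escape: A jumps two, B consumes the backslash and then the escaped character
        have hs : strScanA cs q (fuel + 1) j = strScanA cs q fuel (j + 2) := by
          rw [strScanA, if_pos hn, if_pos hb]
        rw [hs]
        conv_lhs => rw [drop_cons_getD cs j hn]
        rw [bRun_bs _ _ _ _ _ _ hd hb]
        by_cases hn2 : j + 1 < cs.length
        · conv_lhs => rw [drop_cons_getD cs (j + 1) hn2]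
          rw [bRun_esc _ _ _ _ _ _ hd,
            ih (j + 2) items (buf ++ [cs.getD j ' '] ++ [cs.getD (j + 1) ' ']) (by omega)]
          have hge := strScanA_ge cs q fuel (j + 2)
          rw [buf_ext cs (j + 1) (strScanA cs q fuel (j + 2)) (buf ++ [cs.getD j ' ']) hn2 (by omega),
            buf_ext cs j (strScanA cs q fuel (j + 2)) buf hn (by omega)]
        · rw [List.drop_eq_nil_of_le (by omega),
            strScanA_out cs q fuel (j + 2) (by omega),
            List.drop_eq_nil_of_le (by omega)]
          rfl
      · by_cases hq : cs.getD j ' ' = q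
        · -- closing quote
          have hs : strScanA cs q (fuel + 1) j = j + 1 := by
            rw [strScanA, if_pos hn, if_neg hb, if_pos hq]
          rw [hs]
          conv_lhs => rw [drop_cons_getD cs j hn]
          rw [bRun_closeq _ _ _ _ _ _ hd hb hq, seg_cons cs j (j + 1) hn (by omega)]
          simp
        · -- ordinary character inside the literal
          have hs : strScanA cs q (fuel + 1) j = strScanA cs q fuel (j + 1) := by
            rw [strScanA, if_pos hn, if_neg hb, if_neg hq]
          rw [hs]
          conv_lhs => rw [drop_cons_getD cs j hn]
          rw [bRun_inq _ _ _ _ _ _ hd hb hq,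
            ih (j + 1) items (buf ++ [cs.getD j ' ']) (by omega)]
          have hge := strScanA_ge cs q fuel (j + 1)
          rw [buf_ext cs j (strScanA cs q fuel (j + 1)) buf hn (by omega)]
    · rw [strScanA_out cs q (fuel + 1) j hn, List.drop_eq_nil_of_le (by omega)]
      rfl

-- B's machine at depth ≥ 1 outside a string literal mirrors _find_close_brace
theorem bRun_fc (cs : List Char) :
    ∀ fuel (depth : Int) i buf items, 1 ≤ depth → cs.length - i ≤ fuel →
      bRun (cs.drop i) items buf depth none false =
        (if fcLoop cs fuel depth i = -1 then items
         else bRun (cs.drop ((fcLoop cs fuel depth i).toNat + 1))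
           (items ++ [String.ofList (buf ++ (cs.drop i).take ((fcLoop cs fuel depth i).toNat + 1 - i))])
           (buf ++ (cs.drop i).take ((fcLoop cs fuel depth i).toNat + 1 - i)) 0 none false) := by
  intro fuel
  induction fuel with
  | zero =>
    intro depth i buf items hd hf
    rw [List.drop_eq_nil_of_le (by omega)]
    simp [bRun, fcLoop]
  | succ fuel ih =>
    intro depth i buf items hd hf
    have hd0 : ¬ depth = 0 := by omega
    by_cases hn : i < cs.length
    · by_cases hc1 : cs.getD i ' ' = '{'
      · have hfc : fcLoop cs (fuel + 1) depth i = fcLoop cs fuel (depth + 1) (i + 1) := by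
          rw [fcLoop, if_pos hn, if_pos hc1]
        rw [hfc]
        conv_lhs => rw [drop_cons_getD cs i hn]
        rw [bRun_open _ _ _ _ _ hd0 hc1,
          ih (depth + 1) (i + 1) (buf ++ [cs.getD i ' ']) items (by omega) (by omega)]
        by_cases he : fcLoop cs fuel (depth + 1) (i + 1) = -1
        · rw [if_pos he, if_pos he]
        · rw [if_neg he, if_neg he]
          have hge : ((i + 1 : Nat) : Int) ≤ fcLoop cs fuel (depth + 1) (i + 1) := by
            rcases fcLoop_neg_or_ge cs fuel (depth + 1) (i + 1) with h' | h'
            · exact absurd h' he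
            · exact h'
          rw [buf_ext cs i ((fcLoop cs fuel (depth + 1) (i + 1)).toNat + 1) buf hn (by omega)]
      · by_cases hc2 : cs.getD i ' ' = '}'
        · by_cases h1 : depth - 1 = 0
          · have hfc : fcLoop cs (fuel + 1) depth i = (i : Int) := by
              rw [fcLoop, if_pos hn, if_neg hc1, if_pos hc2, if_pos h1]
            rw [hfc, if_neg (show ¬ ((i : Nat) : Int) = -1 by omega)]
            simp only [Int.toNat_natCast]
            conv_lhs => rw [drop_cons_getD cs i hn]
            rw [bRun_close0 _ _ _ _ _ hd0 hc2 h1, seg_cons cs i (i + 1) hn (by omega)]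
            simp
          · have hfc : fcLoop cs (fuel + 1) depth i = fcLoop cs fuel (depth - 1) (i + 1) := by
              rw [fcLoop, if_pos hn, if_neg hc1, if_pos hc2, if_neg h1]
            rw [hfc]
            conv_lhs => rw [drop_cons_getD cs i hn]
            rw [bRun_closeN _ _ _ _ _ hd0 hc2 h1,
              ih (depth - 1) (i + 1) (buf ++ [cs.getD i ' ']) items (by omega) (by omega)]
            by_cases he : fcLoop cs fuel (depth - 1) (i + 1) = -1
            · rw [if_pos he, if_pos he]
            · rw [if_neg he, if_neg he]
              have hge : ((i + 1 : Nat) : Int) ≤ fcLoop cs fuel (depth - 1) (i + 1) := by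
                rcases fcLoop_neg_or_ge cs fuel (depth - 1) (i + 1) with h' | h'
                · exact absurd h' he
                · exact h'
              rw [buf_ext cs i ((fcLoop cs fuel (depth - 1) (i + 1)).toNat + 1) buf hn (by omega)]
        · by_cases hq1 : cs.getD i ' ' = '\''
          · have hfc : fcLoop cs (fuel + 1) depth i =
                fcLoop cs fuel depth (strScanA cs '\'' cs.length (i + 1)) := by
              rw [fcLoop, if_pos hn, if_neg hc1, if_neg hc2, if_pos hq1]
            rw [hfc, ← hq1]
            conv_lhs => rw [drop_cons_getD cs i hn]
            rw [bRun_startq _ _ _ _ _ hd0 hc1 hc2 (Or.inl hq1),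
              bRun_scan cs (cs.getD i ' ') depth hd0 cs.length (i + 1) items
                (buf ++ [cs.getD i ' ']) (by omega)]
            have hk := strScanA_ge cs (cs.getD i ' ') cs.length (i + 1)
            rw [buf_ext cs i (strScanA cs (cs.getD i ' ') cs.length (i + 1)) buf hn (by omega),
              ih depth (strScanA cs (cs.getD i ' ') cs.length (i + 1))
                (buf ++ (cs.drop i).take (strScanA cs (cs.getD i ' ') cs.length (i + 1) - i))
                items hd (by omega)]
            by_cases he : fcLoop cs fuel depth (strScanA cs (cs.getD i ' ') cs.length (i + 1)) = -1
            · rw [if_pos he, if_pos he]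
            · rw [if_neg he, if_neg he]
              have hge : ((strScanA cs (cs.getD i ' ') cs.length (i + 1) : Nat) : Int) ≤
                  fcLoop cs fuel depth (strScanA cs (cs.getD i ' ') cs.length (i + 1)) := by
                rcases fcLoop_neg_or_ge cs fuel depth
                    (strScanA cs (cs.getD i ' ') cs.length (i + 1)) with h' | h'
                · exact absurd h' he
                · exact h'
              rw [List.append_assoc,
                seg_comp cs i (strScanA cs (cs.getD i ' ') cs.length (i + 1))
                  ((fcLoop cs fuel depth (strScanA cs (cs.getD i ' ') cs.length (i + 1))).toNat + 1)
                  (by omega) (by omega)]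
          · by_cases hq2 : cs.getD i ' ' = '"'
            · have hfc : fcLoop cs (fuel + 1) depth i =
                  fcLoop cs fuel depth (strScanA cs '"' cs.length (i + 1)) := by
                rw [fcLoop, if_pos hn, if_neg hc1, if_neg hc2, if_neg hq1, if_pos hq2]
              rw [hfc, ← hq2]
              conv_lhs => rw [drop_cons_getD cs i hn]
              rw [bRun_startq _ _ _ _ _ hd0 hc1 hc2 (Or.inr hq2),
                bRun_scan cs (cs.getD i ' ') depth hd0 cs.length (i + 1) items
                  (buf ++ [cs.getD i ' ']) (by omega)]
              have hk := strScanA_ge cs (cs.getD i ' ') cs.length (i + 1)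
              rw [buf_ext cs i (strScanA cs (cs.getD i ' ') cs.length (i + 1)) buf hn (by omega),
                ih depth (strScanA cs (cs.getD i ' ') cs.length (i + 1))
                  (buf ++ (cs.drop i).take (strScanA cs (cs.getD i ' ') cs.length (i + 1) - i))
                  items hd (by omega)]
              by_cases he : fcLoop cs fuel depth (strScanA cs (cs.getD i ' ') cs.length (i + 1)) = -1
              · rw [if_pos he, if_pos he]
              · rw [if_neg he, if_neg he]
                have hge : ((strScanA cs (cs.getD i ' ') cs.length (i + 1) : Nat) : Int) ≤
                    fcLoop cs fuel depth (strScanA cs (cs.getD i ' ') cs.length (i + 1)) := by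
                  rcases fcLoop_neg_or_ge cs fuel depth
                      (strScanA cs (cs.getD i ' ') cs.length (i + 1)) with h' | h'
                  · exact absurd h' he
                  · exact h'
                rw [List.append_assoc,
                  seg_comp cs i (strScanA cs (cs.getD i ' ') cs.length (i + 1))
                    ((fcLoop cs fuel depth (strScanA cs (cs.getD i ' ') cs.length (i + 1))).toNat + 1)
                    (by omega) (by omega)]
            · have hfc : fcLoop cs (fuel + 1) depth i = fcLoop cs fuel depth (i + 1) := by
                rw [fcLoop, if_pos hn, if_neg hc1, if_neg hc2, if_neg hq1, if_neg hq2]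
              rw [hfc]
              conv_lhs => rw [drop_cons_getD cs i hn]
              rw [bRun_other _ _ _ _ _ hd0 hc1 hc2 (by tauto),
                ih depth (i + 1) (buf ++ [cs.getD i ' ']) items hd (by omega)]
              by_cases he : fcLoop cs fuel depth (i + 1) = -1
              · rw [if_pos he, if_pos he]
              · rw [if_neg he, if_neg he]
                have hge : ((i + 1 : Nat) : Int) ≤ fcLoop cs fuel depth (i + 1) := by
                  rcases fcLoop_neg_or_ge cs fuel depth (i + 1) with h' | h'
                  · exact absurd h' he
                  · exact h'
                rw [buf_ext cs i ((fcLoop cs fuel depth (i + 1)).toNat + 1) buf hn (by omega)]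
    · have hfc : fcLoop cs (fuel + 1) depth i = -1 := by rw [fcLoop, if_neg hn]
      rw [hfc, List.drop_eq_nil_of_le (by omega)]
      simp [bRun]

-- stepping over one whitespace/comma character leaves A's outer loop unchanged
theorem splitLoop_ws (cs : List Char) (fuel : Nat) (items : List String) (i : Nat)
    (h : i < cs.length) (hw : wsChar (cs.getD i ' ') = true) :
    splitLoop cs (fuel + 1) items i = splitLoop cs (fuel + 1) items (i + 1) := by
  have hskip : skipWs cs cs.length i = skipWs cs cs.length (i + 1) :=
    skipWs_step cs cs.length i h hw (by omega)
  by_cases h2 : i + 1 < cs.length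
  · conv_lhs => rw [splitLoop]
    conv_rhs => rw [splitLoop]
    rw [if_pos h, if_pos h2, hskip]
  · have hsk2 : skipWs cs cs.length (i + 1) = i + 1 := skipWs_out cs cs.length (i + 1) h2
    have hL : splitLoop cs (fuel + 1) items i = items := by
      rw [splitLoop, if_pos h, hskip, hsk2, if_pos (Or.inl (by omega))]
    have hR : splitLoop cs (fuel + 1) items (i + 1) = items := by
      rw [splitLoop, if_neg h2]
    rw [hL, hR]

-- A's outer loop equals B's machine in the depth-0 state (any buffer)
theorem splitLoop_eq_bRun (cs : List Char) :
    ∀ fuel i items buf, cs.length - i ≤ fuel →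
      splitLoop cs fuel items i = bRun (cs.drop i) items buf 0 none false := by
  intro fuel
  induction fuel with
  | zero =>
    intro i items buf hf
    rw [List.drop_eq_nil_of_le (by omega)]
    rfl
  | succ fuel ih =>
    intro i items buf hf
    by_cases hn : i < cs.length
    · by_cases hw : wsChar (cs.getD i ' ') = true
      · have hne1 : ¬ cs.getD i ' ' = ']' := fun e => by
          rw [e] at hw; exact absurd hw (by decide)
        have hne2 : ¬ cs.getD i ' ' = '{' := fun e => by
          rw [e] at hw; exact absurd hw (by decide)
        rw [splitLoop_ws cs fuel items i hn hw,
          splitLoop_fuel cs (fuel + 1) fuel items (i + 1) (by omega) (by omega)]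
        conv_rhs => rw [drop_cons_getD cs i hn]
        rw [bRun_top_skip _ _ _ _ _ _ hne1 hne2]
        exact ih (i + 1) items buf (by omega)
      · have hsk : skipWs cs cs.length i = i := skipWs_stay cs cs.length i hw
        by_cases hb : cs.getD i ' ' = ']'
        · rw [splitLoop, if_pos hn, hsk, if_pos (Or.inr hb)]
          conv_rhs => rw [drop_cons_getD cs i hn]
          rw [bRun_top_brk _ _ _ _ _ _ hb]
        · have hcond : ¬ (cs.length ≤ i ∨ cs.getD i ' ' = ']') := by
            intro hcon
            rcases hcon with hx | hx
            · omega
            · exact hb hx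
          by_cases ho : cs.getD i ' ' = '{'
          · have hfc : findCloseBrace cs i = fcLoop cs cs.length 1 (i + 1) := by
              rw [findCloseBrace, fcLoop, if_pos hn, if_pos ho]
              norm_num
            rw [splitLoop, if_pos hn, hsk, if_neg hcond, if_pos ho, hfc]
            conv_rhs => rw [drop_cons_getD cs i hn]
            rw [bRun_top_open _ _ _ _ _ _ ho,
              bRun_fc cs cs.length 1 (i + 1) [cs.getD i ' '] items (by omega) (by omega)]
            by_cases he : fcLoop cs cs.length 1 (i + 1) = -1
            · rw [if_pos he, if_pos he]
            · rw [if_neg he, if_neg he]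
              have hge : ((i + 1 : Nat) : Int) ≤ fcLoop cs cs.length 1 (i + 1) := by
                rcases fcLoop_neg_or_ge cs cs.length 1 (i + 1) with h' | h'
                · exact absurd h' he
                · exact h'
              rw [seg_cons cs i ((fcLoop cs cs.length 1 (i + 1)).toNat + 1) hn (by omega)]
              simp only [List.singleton_append]
              exact ih ((fcLoop cs cs.length 1 (i + 1)).toNat + 1) _ _ (by omega)
          · rw [splitLoop, if_pos hn, hsk, if_neg hcond, if_neg ho]
            conv_rhs => rw [drop_cons_getD cs i hn]
            rw [bRun_top_skip _ _ _ _ _ _ hb ho]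
            exact ih (i + 1) items buf (by omega)
    · rw [splitLoop, if_neg hn, List.drop_eq_nil_of_le (by omega)]
      rfl

-- ===== VERDICT (by name: the statement is the Claim_ definition above) =====
theorem split_brace_items_py_spec : Claim_equal_split_brace_items_py := by
  intro s _
  unfold Spec_split_brace_items_py split_brace_items_py split_brace_items_py_alt
  have h := splitLoop_eq_bRun s.toList (s.toList.length + 1) 0 [] [] (by omega)
  simpa using h
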